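-- pv_equiv track=rewrite | github.com/aalleexxss/Project0 | app.py | generate_fretboard
-- ===== SOURCE A (Python) =====
-- def generate_fretboard(tuning_array):
--     fretboard_array = [[]]
--     for i in tuning_array:
--         fretboard_array[0].append(i)
--     for i in range(14):
--         temp = [(j % 12)+1 for j in fretboard_array[i]]
--         fretboard_array.append(temp)
--     return fretboard_array
-- ===== SOURCE B (Python) =====
-- def generate_fretboard(tuning_array):
--     # Each row i (1..14) is computed directly from the tuning via a closed form,
--     # instead of reading the previously built row.
--     base = [t % 12 for t in tuning_array]
--     rows = [[(b + i) % 12 + 1 for b in base] for i in range(14)]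
--     return [list(tuning_array)] + rows
-- ===== Notes on version B (the rewrite author's own statement) =====
-- stated objective: alternative
-- what changed: B builds each of the 14 derived rows independently from the tuning with the closed form ((t % 12) + i) % 12 + 1, removing A's row-to-row data dependency and its indexed re-reading of the growing fretboard list.
import Mathlib
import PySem

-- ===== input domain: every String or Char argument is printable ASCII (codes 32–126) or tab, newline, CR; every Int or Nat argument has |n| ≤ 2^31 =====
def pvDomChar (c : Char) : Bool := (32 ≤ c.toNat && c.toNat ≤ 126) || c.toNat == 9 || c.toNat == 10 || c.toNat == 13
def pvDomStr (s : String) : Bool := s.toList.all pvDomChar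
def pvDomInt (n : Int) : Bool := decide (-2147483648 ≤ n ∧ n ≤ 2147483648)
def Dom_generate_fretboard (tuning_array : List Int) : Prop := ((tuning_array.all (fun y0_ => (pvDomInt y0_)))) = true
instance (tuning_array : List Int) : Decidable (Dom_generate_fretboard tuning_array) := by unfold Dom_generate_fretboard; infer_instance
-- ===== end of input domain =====

-- B computes each derived row independently from the tuning by a closed form, removing A's row-to-row dependency (alternative decomposition, same cost).


-- ===== PORT A =====
-- fretboard_array[i] is always in range when read, so pyGetD with default [] is exact here.
def generate_fretboard (tuning_array : List Int) : List (List Int) :=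
  let fb0 : List (List Int) := [tuning_array.foldl (fun acc i => acc ++ [i]) []]
  (PySem.List.pyRange 0 14 1).foldl
    (fun fb i =>
      let temp := (PySem.List.pyGetD fb i []).map (fun j => PySem.Int.mod j 12 + 1)
      fb ++ [temp]) fb0

-- ===== PORT B =====
def generate_fretboard_alt (tuning_array : List Int) : List (List Int) :=
  let base := tuning_array.map (fun t => PySem.Int.mod t 12)
  let rows := (PySem.List.pyRange 0 14 1).map
    (fun i => base.map (fun b => PySem.Int.mod (b + i) 12 + 1))
  [tuning_array] ++ rows

-- ===== PRECONDITION & SPEC =====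
def Spec_generate_fretboard (tuning_array : List Int) (out : List (List Int)) : Prop := out = generate_fretboard_alt tuning_array
instance (tuning_array : List Int) (out : List (List Int)) : Decidable (Spec_generate_fretboard tuning_array out) := by unfold Spec_generate_fretboard; infer_instance

-- ===== CLAIM (what is proved, stated in full; the proofs are below) =====
def Claim_equal_generate_fretboard : Prop := ∀ (tuning_array : List Int), Dom_generate_fretboard tuning_array → Spec_generate_fretboard tuning_array (generate_fretboard tuning_array)

-- ===== LEMMAS AND PROOFS =====

-- f k t : the value in row k above open-string value t (A's iterated step).
def pvRow (k : Nat) (t : Int) : Int :=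
  match k with
  | 0 => t
  | k+1 => PySem.Int.mod (pvRow k t) 12 + 1

lemma pvRow_closed (k : Nat) (t : Int) :
    pvRow (k+1) t = PySem.Int.mod (PySem.Int.mod t 12 + (k : Int)) 12 + 1 := by
  induction k with
  | zero => simp [pvRow]
  | succ n ih =>
      show PySem.Int.mod (pvRow (n+1) t) 12 + 1 = _
      rw [ih]
      have h12 : (0:Int) < 12 := by norm_num
      simp only [PySem.Int.mod_eq_emod_of_pos h12]
      omega

lemma foldl_append_singleton_id (l : List Int) :
    l.foldl (fun acc i => acc ++ [i]) [] = l := by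
  suffices h : ∀ acc : List Int, l.foldl (fun acc i => acc ++ [i]) acc = acc ++ l by
    simpa using h []
  induction l with
  | nil => intro acc; simp
  | cons x xs ih => intro acc; simp [List.foldl, ih]

lemma generate_fretboard_inv (tuning_array : List Int) (n : Nat) :
    (PySem.List.pyRange 0 n 1).foldl
      (fun fb i =>
        fb ++ [(PySem.List.pyGetD fb i []).map (fun j => PySem.Int.mod j 12 + 1)])
      [tuning_array.map (pvRow 0)]
    = (List.range (n+1)).map (fun k => tuning_array.map (pvRow k)) := by
  induction n with
  | zero =>
      rw [show PySem.List.pyRange 0 ((0:Nat):Int) 1 = [] from by decide]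
      simp
  | succ n ih =>
      have hc : (((n+1:Nat)):Int) = (n:Int) + 1 := by push_cast; ring
      have hr : PySem.List.pyRange 0 ((n:Int) + 1) 1 = PySem.List.pyRange 0 n 1 ++ [(n : Int)] := by
        simpa using PySem.List.pyRange_one_succ_right (a := 0) (b := (n : Int)) (by omega)
      have hget : PySem.List.pyGetD
          ((List.range (n+1)).map (fun k => tuning_array.map (pvRow k))) ((n : Int)) []
          = tuning_array.map (pvRow n) := by
        rw [PySem.List.pyGetD_natCast]
        simp
      rw [hc, hr, List.foldl_append, ih]
      simp only [List.foldl]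
      rw [hget, List.map_map]
      rw [show List.range (n+1+1) = List.range (n+1) ++ [n+1] from List.range_succ]
      rw [List.map_append]
      rfl

lemma pvRow_map_eq (tuning_array : List Int) (k : Nat) :
    tuning_array.map (pvRow (k+1))
    = (tuning_array.map (fun t => PySem.Int.mod t 12)).map
        (fun b => PySem.Int.mod (b + (k:Int)) 12 + 1) := by
  rw [List.map_map]
  refine List.map_congr_left ?_
  intro t _
  simpa using pvRow_closed k t

theorem generate_fretboard_eq (tuning_array : List Int) :
    generate_fretboard tuning_array = generate_fretboard_alt tuning_array := by
  unfold generate_fretboard generate_fretboard_alt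
  have h0 : tuning_array.foldl (fun acc i => acc ++ [i]) [] = tuning_array.map (pvRow 0) := by
    rw [foldl_append_singleton_id]; simp [pvRow]
  simp only [h0]
  rw [show (14:Int) = ((14:Nat):Int) from by norm_num]
  rw [generate_fretboard_inv tuning_array 14]
  rw [show PySem.List.pyRange 0 ((14:Nat):Int) 1
      = ([0,1,2,3,4,5,6,7,8,9,10,11,12,13] : List Int) from by decide]
  rw [show List.range 15 = [0,1,2,3,4,5,6,7,8,9,10,11,12,13,14] from by decide]
  simp only [List.map_cons, List.map_nil, List.singleton_append]
  refine congrArg₂ _ ?_ (congrArg₂ _ ?_ (congrArg₂ _ ?_ (congrArg₂ _ ?_ (congrArg₂ _ ?_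
    (congrArg₂ _ ?_ (congrArg₂ _ ?_ (congrArg₂ _ ?_ (congrArg₂ _ ?_ (congrArg₂ _ ?_
    (congrArg₂ _ ?_ (congrArg₂ _ ?_ (congrArg₂ _ ?_ (congrArg₂ _ ?_ (congrArg₂ _ ?_ rfl))))))))))))))
  · rw [show pvRow 0 = id from rfl, List.map_id]
  · simpa using pvRow_map_eq tuning_array 0
  · simpa using pvRow_map_eq tuning_array 1
  · simpa using pvRow_map_eq tuning_array 2
  · simpa using pvRow_map_eq tuning_array 3
  · simpa using pvRow_map_eq tuning_array 4
  · simpa using pvRow_map_eq tuning_array 5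
  · simpa using pvRow_map_eq tuning_array 6
  · simpa using pvRow_map_eq tuning_array 7
  · simpa using pvRow_map_eq tuning_array 8
  · simpa using pvRow_map_eq tuning_array 9
  · simpa using pvRow_map_eq tuning_array 10
  · simpa using pvRow_map_eq tuning_array 11
  · simpa using pvRow_map_eq tuning_array 12
  · simpa using pvRow_map_eq tuning_array 13

-- ===== VERDICT (by name: the statement is the Claim_ definition above) =====
theorem generate_fretboard_spec : Claim_equal_generate_fretboard := by
  intro tuning_array _
  exact generate_fretboard_eq tuning_array
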